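-- pv_equiv track=rewrite | github.com/blankRiot96/axedit | axedit/completions_server.py | get_fuzzy_matched_indeces
-- ===== SOURCE A (Python) =====
-- def get_fuzzy_matched_indeces(name: str, item: str) -> list[int]:
--     res = []
--     name, item = name.lower(), item.lower()
--     for c1 in name:
--         for i, c2 in enumerate(item):
--             if i in res:
--                 continue
--             if len(res) == len(name):
--                 return res
--             if c1 == c2:
--                 res.append(i)
--
--     return res
-- ===== SOURCE B (Python) =====
-- def get_fuzzy_matched_indeces(name: str, item: str) -> list[int]:
--     name, item = name.lower(), item.lower()
--     pos = {}
--     for i, c in enumerate(item):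
--         pos.setdefault(c, []).append(i)
--     res = []
--     for c in name:
--         for i in pos.get(c, []):
--             if i not in res:
--                 res.append(i)
--     return res[:len(name)]
-- ===== Notes on version B (the rewrite author's own statement) =====
-- stated objective: faster
-- what changed: B builds a char->indices table of the item in one pass and walks each name char's index list, instead of rescanning the whole item (with an in-loop cap check) for every name char; the cap becomes a final res[:len(name)] truncation.
import Mathlib
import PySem

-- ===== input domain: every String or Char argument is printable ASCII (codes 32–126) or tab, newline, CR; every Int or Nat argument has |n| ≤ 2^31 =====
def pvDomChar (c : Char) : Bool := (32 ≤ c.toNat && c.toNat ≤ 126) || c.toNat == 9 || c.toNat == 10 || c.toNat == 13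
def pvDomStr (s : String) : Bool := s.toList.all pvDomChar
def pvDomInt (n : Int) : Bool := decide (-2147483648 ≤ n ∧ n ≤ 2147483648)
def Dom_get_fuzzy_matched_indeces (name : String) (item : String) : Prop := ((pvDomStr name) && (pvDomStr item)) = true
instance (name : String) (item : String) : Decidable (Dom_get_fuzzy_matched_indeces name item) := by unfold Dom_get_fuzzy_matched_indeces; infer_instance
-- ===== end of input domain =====

-- B replaces A's repeated rescans of item (with an in-loop length cap) by a one-pass
-- char->indices table plus per-name-char lookups and a final truncation (objective: faster).

-- ===== PORT A =====
-- inner 'for i, c2 in enumerate(item)' loop; Bool = True means the early 'return res' fired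
def gfInnerA (n : Nat) (c1 : Char) : List (Int × Char) → List Int → Bool × List Int
  | [], res => (false, res)
  | (i, c2) :: rest, res =>
    if i ∈ res then gfInnerA n c1 rest res
    else if res.length = n then (true, res)
    else if c1 = c2 then gfInnerA n c1 rest (res ++ [i])
    else gfInnerA n c1 rest res

-- outer 'for c1 in name' loop
def gfOuterA (n : Nat) (pairs : List (Int × Char)) : List Char → List Int → List Int
  | [], res => res
  | c1 :: cs, res =>
    match gfInnerA n c1 pairs res with
    | (true, r) => r
    | (false, r) => gfOuterA n pairs cs r

def get_fuzzy_matched_indeces (name : String) (item : String) : List Int :=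
  let ln := (PySem.Str.lower name).toList
  let li := (PySem.Str.lower item).toList
  gfOuterA ln.length (PySem.List.enumerate li) ln []

-- ===== PORT B =====
-- pos.setdefault(c, []).append(i): same mapping as overwrite-in-place with the extended list
def gfBuildPos : List (Int × Char) → PySem.Dict Char (List Int) → PySem.Dict Char (List Int)
  | [], d => d
  | (i, c) :: rest, d => gfBuildPos rest (d.insert c (d.getD c [] ++ [i]))

-- 'for i in pos.get(c, []): if i not in res: res.append(i)'
def gfInnerB : List Int → List Int → List Int
  | [], res => res
  | i :: is, res => if i ∈ res then gfInnerB is res else gfInnerB is (res ++ [i])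

def gfOuterB (pos : PySem.Dict Char (List Int)) : List Char → List Int → List Int
  | [], res => res
  | c :: cs, res => gfOuterB pos cs (gfInnerB (pos.getD c []) res)

def get_fuzzy_matched_indeces_alt (name : String) (item : String) : List Int :=
  let ln := (PySem.Str.lower name).toList
  let li := (PySem.Str.lower item).toList
  let pos := gfBuildPos (PySem.List.enumerate li) PySem.Dict.empty
  PySem.List.slice (gfOuterB pos ln []) none (some (ln.length : Int))  -- res[:len(name)]

-- ===== PRECONDITION & SPEC =====
def Spec_get_fuzzy_matched_indeces (name : String) (item : String) (out : List Int) : Prop := out = get_fuzzy_matched_indeces_alt name item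
instance (name : String) (item : String) (out : List Int) : Decidable (Spec_get_fuzzy_matched_indeces name item out) := by unfold Spec_get_fuzzy_matched_indeces; infer_instance

-- ===== CLAIM (what is proved, stated in full; the proofs are below) =====
def Claim_equal_get_fuzzy_matched_indeces : Prop := ∀ (name : String) (item : String), Dom_get_fuzzy_matched_indeces name item → Spec_get_fuzzy_matched_indeces name item (get_fuzzy_matched_indeces name item)

-- ===== LEMMAS AND PROOFS =====

-- indices of pairs whose char equals c, in order
def gfMatchIdxs (c : Char) (pairs : List (Int × Char)) : List Int :=
  (pairs.filter (fun p => p.2 == c)).map Prod.fst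

theorem gfBuildPos_getD (pairs : List (Int × Char)) (d : PySem.Dict Char (List Int)) (c : Char) :
    (gfBuildPos pairs d).getD c [] = d.getD c [] ++ gfMatchIdxs c pairs := by
  induction pairs generalizing d with
  | nil => simp [gfBuildPos, gfMatchIdxs]
  | cons p rest ih =>
    obtain ⟨i, c2⟩ := p
    rw [gfBuildPos, ih, PySem.Dict.getD_insert]
    by_cases h : c = c2
    · subst h
      simp [gfMatchIdxs]
    · have h' : c2 ≠ c := Ne.symm h
      simp [h, h', gfMatchIdxs]

theorem gfInnerB_prefix (idxs : List Int) (res : List Int) : res <+: gfInnerB idxs res := by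
  induction idxs generalizing res with
  | nil => simp [gfInnerB]
  | cons i is ih =>
    rw [gfInnerB]
    split
    · exact ih res
    · exact List.IsPrefix.trans ⟨[i], rfl⟩ (ih (res ++ [i]))

theorem gfOuterB_prefix (pos : PySem.Dict Char (List Int)) (cs : List Char) (res : List Int) :
    res <+: gfOuterB pos cs res := by
  induction cs generalizing res with
  | nil => simp [gfOuterB]
  | cons c cs ih =>
    exact List.IsPrefix.trans (gfInnerB_prefix _ res) (ih _)

theorem gfTake_of_prefix {res l : List Int} (h : res <+: l) (hn : res.length = n) :
    l.take n = res := by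
  obtain ⟨t, rfl⟩ := h
  subst hn
  simp

-- A's inner loop computes the n-truncation of B's inner loop on the matching indices
theorem gfInnerA_eq (n : Nat) (c1 : Char) (pairs : List (Int × Char)) (res : List Int)
    (h : res.length ≤ n) :
    (gfInnerA n c1 pairs res).2 = (gfInnerB (gfMatchIdxs c1 pairs) res).take n := by
  induction pairs generalizing res with
  | nil =>
    simp [gfInnerA, gfInnerB, gfMatchIdxs, List.take_of_length_le h]
  | cons p rest ih =>
    obtain ⟨i, c2⟩ := p
    rw [gfInnerA]
    by_cases hmem : i ∈ res
    · by_cases hc : c1 = c2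
      · subst hc
        simp only [if_pos hmem, gfMatchIdxs, List.filter_cons, BEq.rfl, if_true,
          List.map_cons, gfInnerB]
        exact ih res h
      · have hc' : c2 ≠ c1 := fun h' => hc h'.symm
        simp [hmem, gfMatchIdxs, hc', ih res h]
    · by_cases hlen : res.length = n
      · simp only [hmem, if_false, if_pos hlen]
        exact (gfTake_of_prefix (gfInnerB_prefix _ res) hlen).symm
      · by_cases hc : c1 = c2
        · subst hc
          have h' : (res ++ [i]).length ≤ n := by
            simp only [List.length_append, List.length_cons, List.length_nil]
            omega
          simp only [if_neg hmem, if_neg hlen, gfMatchIdxs, List.filter_cons,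
            BEq.rfl, if_true, List.map_cons, gfInnerB]
          exact ih _ h'
        · have hc' : c2 ≠ c1 := fun h' => hc h'.symm
          simp [hmem, hlen, hc, hc', gfMatchIdxs, ih res h]

-- if the inner loop returned early, res had reached full length n
theorem gfInnerA_true (n : Nat) (c1 : Char) (pairs : List (Int × Char)) (res : List Int)
    (hb : (gfInnerA n c1 pairs res).1 = true) :
    (gfInnerA n c1 pairs res).2.length = n := by
  induction pairs generalizing res with
  | nil => simp [gfInnerA] at hb
  | cons p rest ih =>
    obtain ⟨i, c2⟩ := p
    rw [gfInnerA] at hb ⊢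
    by_cases hmem : i ∈ res
    · simpa [hmem] using ih res (by simpa [hmem] using hb)
    · by_cases hlen : res.length = n
      · simp [hmem, hlen]
      · by_cases hc : c1 = c2
        · simpa [hmem, hlen, hc] using ih _ (by simpa [hmem, hlen, hc] using hb)
        · simpa [hmem, hlen, hc] using ih res (by simpa [hmem, hlen, hc] using hb)

-- once res is full, A's loops never change it
theorem gfOuterA_full (n : Nat) (pairs : List (Int × Char)) (cs : List Char) (res : List Int)
    (h : res.length = n) : gfOuterA n pairs cs res = res := by
  induction cs generalizing res with
  | nil => rfl
  | cons c cs ih =>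
    have h2 : (gfInnerA n c pairs res).2 = res := by
      rw [gfInnerA_eq n c pairs res (le_of_eq h)]
      exact gfTake_of_prefix (gfInnerB_prefix _ res) h
    rcases hr : gfInnerA n c pairs res with ⟨b, r⟩
    have hr2 : r = res := by rw [hr] at h2; exact h2
    rw [gfOuterA, hr]
    cases b
    · show gfOuterA n pairs cs r = res
      rw [hr2]; exact ih res h
    · exact hr2

-- the main invariant: A's outer loop is the n-truncation of B's (uncapped) outer loop
theorem gfOuterA_eq (n : Nat) (pairs : List (Int × Char)) (cs : List Char)
    (pos : PySem.Dict Char (List Int))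
    (hpos : ∀ c, pos.getD c [] = gfMatchIdxs c pairs)
    (res : List Int) (h : res.length ≤ n) :
    gfOuterA n pairs cs res = (gfOuterB pos cs res).take n := by
  induction cs generalizing res with
  | nil => simp [gfOuterA, gfOuterB, List.take_of_length_le h]
  | cons c cs ih =>
    have hinner := gfInnerA_eq n c pairs res h
    rcases hr : gfInnerA n c pairs res with ⟨b, r⟩
    have hr2 : r = (gfInnerB (gfMatchIdxs c pairs) res).take n := by
      rw [hr] at hinner; exact hinner
    rw [gfOuterA, hr, gfOuterB, hpos c]
    cases b
    · -- no early return
      show gfOuterA n pairs cs r = _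
      by_cases hle : (gfInnerB (gfMatchIdxs c pairs) res).length ≤ n
      · rw [hr2, List.take_of_length_le hle]
        exact ih _ hle
      · have hlr : r.length = n := by
          rw [hr2, List.length_take]; omega
        rw [gfOuterA_full n pairs cs r hlr]
        refine (gfTake_of_prefix ?_ hlr).symm
        rw [hr2]
        exact List.IsPrefix.trans (List.take_prefix _ _) (gfOuterB_prefix pos cs _)
    · -- early return: r already has length n, and it is a prefix of B's final list
      show r = _
      have hlr : r.length = n := by
        have := gfInnerA_true n c pairs res (by rw [hr])
        rw [hr] at this; exact this
      refine (gfTake_of_prefix ?_ hlr).symm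
      rw [hr2]
      exact List.IsPrefix.trans (List.take_prefix _ _) (gfOuterB_prefix pos cs _)

-- ===== VERDICT (by name: the statement is the Claim_ definition above) =====
theorem get_fuzzy_matched_indeces_spec : Claim_equal_get_fuzzy_matched_indeces := by
  intro name item _
  unfold Spec_get_fuzzy_matched_indeces get_fuzzy_matched_indeces get_fuzzy_matched_indeces_alt
  rw [PySem.List.slice_to_natCast]
  exact gfOuterA_eq _ _ _ _
    (fun c => by rw [gfBuildPos_getD]; simp [PySem.Dict.getD_empty])
    [] (by simp)
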